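-- pv_equiv track=rewrite | github.com/hojoungjang/programming-exercises | List-of-Unique-Numbers/solution.py | solution
-- ===== SOURCE A (Python) =====
-- def solution(nums: list[int]) -> int:
--     start = 0
--     seen = set()
--     count = 0
--
--     for end in range(len(nums)):
--         while nums[end] in seen and start < end:
--             seen.remove(nums[start])
--             count += end - start
--             start += 1
--         seen.add(nums[end])
--
--     for idx in range(start, len(nums)):
--         count += len(nums) - idx
--
--     return count
-- ===== SOURCE B (Python) =====
-- def solution(nums: list[int]) -> int:
--     count = 0
--     n = len(nums)
--     for i in range(n):
--         seen = set()
--         for j in range(i, n):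
--             if nums[j] in seen:
--                 break
--             seen.add(nums[j])
--             count += 1
--     return count
-- ===== Notes on version B (the rewrite author's own statement) =====
-- stated objective: alternative
-- what changed: Replaces A's single-pass sliding window with deferred per-start counting by the direct nested brute force: for each start index, scan forward with a fresh seen-set and count until the first repeated element.
import Mathlib
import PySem

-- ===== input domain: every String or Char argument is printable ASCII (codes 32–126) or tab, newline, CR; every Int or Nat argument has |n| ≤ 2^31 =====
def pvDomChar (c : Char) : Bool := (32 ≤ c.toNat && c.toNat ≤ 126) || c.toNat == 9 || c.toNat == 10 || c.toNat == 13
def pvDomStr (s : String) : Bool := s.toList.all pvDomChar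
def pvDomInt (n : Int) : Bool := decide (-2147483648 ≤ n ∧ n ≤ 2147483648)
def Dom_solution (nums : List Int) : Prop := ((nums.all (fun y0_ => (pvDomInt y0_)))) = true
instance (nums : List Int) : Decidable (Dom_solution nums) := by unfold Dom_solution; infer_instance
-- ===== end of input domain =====

-- B replaces A's amortized sliding window (deferred counting) by the direct nested
-- brute-force scan: for each start, extend until the first repeat (objective: simpler; not faster).

-- ===== PORT A =====
-- the inner 'while nums[end] in seen and start < end' loop of A.
-- Indices are always in range here (start < e < len nums along every call), so xs.getD i 0 = xs[i];
-- Python's seen.remove(x) can raise KeyError, but here x = nums[start] is always a member of seen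
-- (start < e means the window is nonempty with head nums[start]), so Set.discard is exact.
def aWhile (nums : List Int) (e : Nat) (start : Nat) (seen : PySem.Set Int) (count : Int) :
    Nat × PySem.Set Int × Int :=
  if _h : PySem.Set.contains seen (nums.getD e 0) = true ∧ start < e then
    aWhile nums e (start + 1) (PySem.Set.discard seen (nums.getD start 0))
      (count + ((e : Int) - (start : Int)))
  else (start, seen, count)
termination_by e - start
decreasing_by omega

-- one iteration of A's main 'for end in range(len(nums))' loop
def aStep (nums : List Int) (st : Nat × PySem.Set Int × Int) (e : Nat) :
    Nat × PySem.Set Int × Int :=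
  let r := aWhile nums e st.1 st.2.1 st.2.2
  (r.1, PySem.Set.add r.2.1 (nums.getD e 0), r.2.2)

def solution (nums : List Int) : Int :=
  let st := (List.range nums.length).foldl (aStep nums) (0, PySem.Set.empty, 0)
  -- for idx in range(start, len(nums)): count += len(nums) - idx
  (List.range' st.1 (nums.length - st.1)).foldl
    (fun (c : Int) (idx : Nat) => c + ((nums.length : Int) - (idx : Int))) st.2.2

-- ===== PORT B =====
-- B's inner loop: scan forward, stop (break) at the first element already seen, count the rest.
def bScan (seen : PySem.Set Int) : List Int → Int
  | [] => 0
  | x :: xs =>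
    if PySem.Set.contains seen x = true then 0
    else bScan (PySem.Set.add seen x) xs + 1

-- B's outer loop 'for i in range(n)': one fresh scan per start index, i.e. per suffix.
def solution_alt : List Int → Int
  | [] => 0
  | x :: xs => bScan PySem.Set.empty (x :: xs) + solution_alt xs

-- ===== PRECONDITION & SPEC =====
def Spec_solution (nums : List Int) (out : Int) : Prop := out = solution_alt nums
instance (nums : List Int) (out : Int) : Decidable (Spec_solution nums out) := by unfold Spec_solution; infer_instance

-- ===== CLAIM (what is proved, stated in full; the proofs are below) =====
def Claim_equal_solution : Prop := ∀ (nums : List Int), Dom_solution nums → Spec_solution nums (solution nums)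

-- ===== LEMMAS AND PROOFS =====

-- a duplicate-free list disjoint from seen is scanned to the end
theorem bScan_full (s : PySem.Set Int) (xs : List Int)
    (h1 : xs.Nodup) (h2 : ∀ a ∈ xs, a ∉ s) : bScan s xs = (xs.length : Int) := by
  induction xs generalizing s with
  | nil => rfl
  | cons x xs ih =>
    have hx : x ∉ s := h2 x (by simp)
    simp only [bScan, PySem.Set.contains_eq_listContains]
    rw [if_neg (by simpa using hx)]
    have h2' : ∀ a ∈ xs, a ∉ PySem.Set.add s x := by
      intro a ha
      rw [PySem.Set.mem_add]
      rintro (h | rfl)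
      · exact h2 a (by simp [ha]) h
      · exact (List.nodup_cons.1 h1).1 ha
    rw [ih (PySem.Set.add s x) h1.of_cons h2']
    push_cast [List.length_cons]
    ring

-- the scan stops exactly at the first repeated/seen element
theorem bScan_stop (s : PySem.Set Int) (xs : List Int) (k : Nat) (hk : k < xs.length)
    (h1 : (xs.take k).Nodup) (h2 : ∀ a ∈ xs.take k, a ∉ s)
    (h3 : xs[k] ∈ xs.take k ∨ xs[k] ∈ s) : bScan s xs = (k : Int) := by
  induction k generalizing s xs with
  | zero =>
    match xs, hk with
    | x :: xs, _ =>
      have hx : x ∈ s := by simpa using h3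
      simp only [bScan]
      rw [if_pos ((PySem.Set.contains_iff s x).2 hx)]
      rfl
  | succ k ih =>
    match xs, hk with
    | x :: xs, hk =>
      have hx : x ∉ s := h2 x (by simp)
      simp only [bScan, PySem.Set.contains_eq_listContains]
      rw [if_neg (by simpa using hx)]
      have htk : (x :: xs).take (k+1) = x :: xs.take k := rfl
      rw [htk] at h1 h2 h3
      have h2' : ∀ a ∈ xs.take k, a ∉ PySem.Set.add s x := by
        intro a ha
        rw [PySem.Set.mem_add]
        rintro (h | rfl)
        · exact h2 a (by simp [ha]) h
        · exact (List.nodup_cons.1 h1).1 ha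
      have h3' : xs[k]'(by simpa using hk) ∈ xs.take k ∨ xs[k]'(by simpa using hk) ∈ PySem.Set.add s x := by
        have h3'' : xs[k]'(by simpa using hk) ∈ x :: xs.take k ∨ xs[k]'(by simpa using hk) ∈ s := by
          simpa using h3
        rcases h3'' with h | h
        · rcases List.mem_cons.1 h with h | h
          · right; rw [PySem.Set.mem_add]; right; exact h
          · left; exact h
        · right; rw [PySem.Set.mem_add]; left; exact h
      rw [ih (PySem.Set.add s x) xs (by simpa using hk) h1.of_cons h2' h3']
      push_cast
      ring

-- abbreviations used only by the proofs
def win (nums : List Int) (s e : Nat) : List Int := (nums.drop s).take (e - s)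

def S (nums : List Int) (s : Nat) : Int :=
  ∑ i ∈ Finset.range s, bScan PySem.Set.empty (nums.drop i)

def AInv (nums : List Int) (e : Nat) (st : Nat × PySem.Set Int × Int) : Prop :=
  st.1 ≤ e ∧ (∀ x : Int, x ∈ st.2.1 ↔ x ∈ win nums st.1 e) ∧
    (win nums st.1 e).Nodup ∧ st.2.2 = S nums st.1

theorem win_cons (nums : List Int) (s e : Nat) (hs : s < e) (he : e ≤ nums.length) :
    win nums s e = nums[s]'(by omega) :: win nums (s+1) e := by
  unfold win
  rw [List.drop_eq_getElem_cons (by omega)]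
  have : e - s = (e - (s+1)) + 1 := by omega
  rw [this, List.take_succ_cons]

theorem aWhile_spec (nums : List Int) (e : Nat) (he : e < nums.length) :
    ∀ (start : Nat) (seen : PySem.Set Int) (count : Int),
      start ≤ e → (∀ x : Int, x ∈ seen ↔ x ∈ win nums start e) →
      (win nums start e).Nodup → count = S nums start →
      let r := aWhile nums e start seen count
      AInv nums e r ∧ nums[e] ∉ win nums r.1 e := by
  intro start seen count hse hmem hnd hcnt
  induction hn : e - start generalizing start seen count with
  | zero =>
    -- start = e : the window is empty, the while test is false
    have hse' : start = e := by omega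
    rw [aWhile]
    have hwin : win nums start e = [] := by simp [win, hse']
    rw [dif_neg (fun hcond => absurd hcond.2 (by omega))]
    refine ⟨⟨hse, hmem, hnd, hcnt⟩, ?_⟩
    simp [hwin]
  | succ n ih =>
    have hlt : start < e := by omega
    rw [aWhile]
    by_cases hc : PySem.Set.contains seen (nums.getD e 0) = true
    · rw [dif_pos ⟨hc, hlt⟩]
      have hgetE : nums.getD e 0 = nums[e] := List.getD_eq_getElem nums 0 he
      have hgetS : nums.getD start 0 = nums[start]'(by omega) :=
        List.getD_eq_getElem nums 0 (by omega)
      have hwc := win_cons nums start e hlt (by omega)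
      have hcm : nums[e] ∈ seen := (PySem.Set.contains_iff _ _).1 (by rwa [hgetE] at hc)
      have hInWin : nums[e] ∈ win nums start e := (hmem _).1 hcm
      -- membership after discard
      have hmem' : ∀ x : Int, x ∈ PySem.Set.discard seen (nums.getD start 0) ↔
          x ∈ win nums (start+1) e := by
        intro x
        rw [PySem.Set.mem_discard, hmem x, hgetS, hwc]
        constructor
        · rintro ⟨hx, hne⟩
          rcases List.mem_cons.1 hx with h | h
          · exact absurd h hne
          · exact h
        · intro hx
          rw [hwc] at hnd
          exact ⟨List.mem_cons_of_mem _ hx, fun hEq => (List.nodup_cons.1 hnd).1 (hEq ▸ hx)⟩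
      have hnd' : (win nums (start+1) e).Nodup := by
        rw [hwc] at hnd; exact hnd.of_cons
      -- the deferred count for this start index equals B's scan from it
      have hscan : bScan PySem.Set.empty (nums.drop start) = ((e - start : Nat) : Int) := by
        have hk : e - start < (nums.drop start).length := by rw [List.length_drop]; omega
        have hidx : (nums.drop start)[e - start]'hk = nums[e] := by
          rw [List.getElem_drop]; congr 1; omega
        exact bScan_stop PySem.Set.empty (nums.drop start) (e - start) hk hnd
          (by intro a _ ha; simp [PySem.Set.empty] at ha)
          (Or.inl (by rw [hidx]; exact hInWin))
      have hcnt' : count + ((e : Int) - (start : Int)) = S nums (start+1) := by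
        rw [hcnt, S, S, Finset.sum_range_succ, hscan]
        push_cast [Nat.cast_sub (le_of_lt hlt)]
        ring
      exact ih (start+1) _ _ (by omega) hmem' hnd' hcnt' (by omega)
    · rw [dif_neg (by tauto)]
      refine ⟨⟨hse, hmem, hnd, hcnt⟩, ?_⟩
      intro hIn
      have hgetE : nums.getD e 0 = nums[e] := List.getD_eq_getElem nums 0 he
      exact hc (by rw [hgetE]; exact (PySem.Set.contains_iff _ _).2 ((hmem _).2 hIn))

theorem aMain_inv (nums : List Int) :
    ∀ e ≤ nums.length, AInv nums e ((List.range e).foldl (aStep nums) (0, PySem.Set.empty, 0)) := by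
  intro e
  induction e with
  | zero =>
    intro _
    refine ⟨le_refl 0, ?_, by simp [win], by simp [S]⟩
    intro x; simp [PySem.Set.empty, win]
  | succ e ih =>
    intro he
    have heL : e < nums.length := by omega
    obtain ⟨h1, h2, h3, h4⟩ := ih (by omega)
    rw [List.range_succ, List.foldl_append, List.foldl_cons, List.foldl_nil]
    set st := (List.range e).foldl (aStep nums) (0, PySem.Set.empty, 0) with hst
    obtain ⟨⟨r1, r2, r3, r4⟩, rpost⟩ := aWhile_spec nums e heL st.1 st.2.1 st.2.2 h1 h2 h3 h4
    set r := aWhile nums e st.1 st.2.1 st.2.2 with hr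
    have hgetE : nums.getD e 0 = nums[e] := List.getD_eq_getElem nums 0 heL
    have hwin' : win nums r.1 (e+1) = win nums r.1 e ++ [nums[e]] := by
      unfold win
      have h5 : e + 1 - r.1 = (e - r.1) + 1 := by omega
      rw [h5, List.take_add_one, List.getElem?_drop]
      have h6 : r.1 + (e - r.1) = e := by omega
      rw [h6, List.getElem?_eq_getElem heL]
      rfl
    have hstep : aStep nums st e = (r.1, PySem.Set.add r.2.1 (nums.getD e 0), r.2.2) := by
      rw [hr]; rfl
    rw [hstep]
    have hdisj : (win nums r.1 e).Disjoint [nums[e]] := by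
      intro a ha hb
      rw [List.mem_singleton] at hb
      exact rpost (hb ▸ ha)
    refine ⟨by omega, ?_, ?_, r4⟩
    · intro x
      rw [PySem.Set.mem_add, hgetE, hwin', List.mem_append, List.mem_singleton, r2 x]
    · rw [hwin']
      exact List.Nodup.append r3 (by simp) hdisj

-- the final 'for idx in range(start, n)' loop of A adds exactly B's per-start scans for starts ≥ s
theorem tail_loop (nums : List Int) :
    ∀ (k s : Nat) (c : Int), s + k = nums.length → (nums.drop s).Nodup →
      (List.range' s k).foldl (fun (c : Int) (idx : Nat) => c + ((nums.length : Int) - (idx : Int))) c =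
        c + ∑ i ∈ Finset.Ico s nums.length, bScan PySem.Set.empty (nums.drop i) := by
  intro k
  induction k with
  | zero =>
    intro s c hs _
    have hse : s = nums.length := by omega
    subst hse
    simp [List.range']
  | succ k ih =>
    intro s c hs hnd
    have hslt : s < nums.length := by omega
    have hnd' : (nums.drop (s+1)).Nodup := by
      have h := List.Sublist.nodup (List.drop_sublist 1 (nums.drop s)) hnd
      rwa [List.drop_drop] at h
    rw [List.range'_succ, List.foldl_cons,
      ih (s+1) (c + ((nums.length : Int) - (s : Int))) (by omega) hnd']
    have hfull : bScan PySem.Set.empty (nums.drop s) = ((nums.length - s : Nat) : Int) := by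
      rw [bScan_full PySem.Set.empty _ hnd (by intro a _ ha; simp [PySem.Set.empty] at ha)]
      simp
    rw [show Finset.Ico s nums.length = insert s (Finset.Ico (s+1) nums.length) from
      (Finset.insert_Ico_add_one_left_eq_Ico hslt).symm]
    rw [Finset.sum_insert (by simp), hfull]
    push_cast [Nat.cast_sub (le_of_lt hslt)]
    ring

-- B computes the sum of its per-suffix scans
theorem alt_eq_sum (nums : List Int) :
    solution_alt nums = ∑ i ∈ Finset.range nums.length, bScan PySem.Set.empty (nums.drop i) := by
  induction nums with
  | nil => simp [solution_alt]
  | cons x xs ih =>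
    rw [solution_alt, ih]
    simp only [List.length_cons]
    rw [Finset.sum_range_succ']
    simp [List.drop_succ_cons, add_comm]

-- ===== VERDICT (by name: the statement is the Claim_ definition above) =====
theorem solution_spec : Claim_equal_solution := by
  intro nums _
  unfold Spec_solution solution
  obtain ⟨h1, h2, h3, h4⟩ := aMain_inv nums nums.length (le_refl _)
  set st := (List.range nums.length).foldl (aStep nums) (0, PySem.Set.empty, 0) with hst
  have hdrop : win nums st.1 nums.length = nums.drop st.1 := by
    unfold win
    rw [List.take_of_length_le (by simp)]
  rw [tail_loop nums (nums.length - st.1) st.1 st.2.2 (by omega) (hdrop ▸ h3), h4, alt_eq_sum]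
  unfold S
  exact Finset.sum_range_add_sum_Ico _ h1
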